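-- pv_equiv track=rewrite | github.com/Nidhi-kumari/tipr-first-assignment | src/MNB.py | mergedDocument
-- ===== SOURCE A (Python) =====
-- def mergedDocument(document_list):
--     merged_document={}
--     class1=['1','0','-1']
--     for clas in class1:
--         string=""
--         for l in document_list:
--             if l[0]==clas:
--                 string+=l[1]
--
--         merged_document[clas]=string
--     return merged_document
-- ===== SOURCE B (Python) =====
-- def mergedDocument(document_list):
--     merged_document = {'1': '', '0': '', '-1': ''}
--     for l in document_list:
--         if l[0] in merged_document:
--             merged_document[l[0]] += l[1]
--     return merged_document
-- ===== Notes on version B (the rewrite author's own statement) =====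
-- stated objective: simpler
-- what changed: B pre-initializes the three known labels to empty strings and groups in a single pass over document_list, instead of A's three repeated full scans (one per class label).
import Mathlib
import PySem

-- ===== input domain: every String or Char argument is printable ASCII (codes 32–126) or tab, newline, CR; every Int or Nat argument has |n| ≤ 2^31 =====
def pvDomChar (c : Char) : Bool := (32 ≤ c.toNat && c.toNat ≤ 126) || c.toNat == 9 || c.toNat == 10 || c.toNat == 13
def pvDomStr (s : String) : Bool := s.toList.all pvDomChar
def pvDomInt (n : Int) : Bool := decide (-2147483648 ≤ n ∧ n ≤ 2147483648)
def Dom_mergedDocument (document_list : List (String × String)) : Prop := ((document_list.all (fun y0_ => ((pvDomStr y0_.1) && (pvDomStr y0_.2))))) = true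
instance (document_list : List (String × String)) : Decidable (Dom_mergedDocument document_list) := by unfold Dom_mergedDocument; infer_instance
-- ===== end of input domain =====

-- B replaces A's three full scans (one per class label) with a single grouping pass
-- over a dict pre-initialized with the three labels; simpler, same result.

-- ===== PORT A =====
def mergedDocument (document_list : List (String × String)) : List (String × String) :=
  let class1 : List String := ["1", "0", "-1"]
  (class1.foldl (fun merged_document clas =>
      let string := document_list.foldl
        (fun string l => if l.1 = clas then string ++ l.2 else string) ""
      merged_document.insert clas string)
    (PySem.Dict.empty)).items

-- ===== PORT B =====
def mergedDocument_alt (document_list : List (String × String)) : List (String × String) :=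
  (document_list.foldl
    (fun merged_document l =>
      if merged_document.contains l.1 then
        merged_document.modify l.1 "" (· ++ l.2)
      else merged_document)
    (PySem.Dict.ofList [("1", ""), ("0", ""), ("-1", "")])).items

-- ===== PRECONDITION & SPEC =====
def Spec_mergedDocument (document_list : List (String × String)) (out : List (String × String)) : Prop := out = mergedDocument_alt document_list
instance (document_list : List (String × String)) (out : List (String × String)) : Decidable (Spec_mergedDocument document_list out) := by unfold Spec_mergedDocument; infer_instance

-- ===== CLAIM (what is proved, stated in full; the proofs are below) =====
def Claim_equal_mergedDocument : Prop := ∀ (document_list : List (String × String)), Dom_mergedDocument document_list → Spec_mergedDocument document_list (mergedDocument document_list)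

-- ===== LEMMAS AND PROOFS =====

-- One step of B's loop on the literal three-key dict, evaluated.
lemma step_eval (a b c : String) (k v : String) :
    (if (PySem.Dict.mk [("1", a), ("0", b), ("-1", c)]).contains k then
        (PySem.Dict.mk [("1", a), ("0", b), ("-1", c)]).modify k "" (· ++ v)
      else PySem.Dict.mk [("1", a), ("0", b), ("-1", c)])
    = PySem.Dict.mk
        [("1", if k = "1" then a ++ v else a),
         ("0", if k = "0" then b ++ v else b),
         ("-1", if k = "-1" then c ++ v else c)] := by
  by_cases h1 : k = "1"
  · subst h1; rfl
  by_cases h0 : k = "0"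
  · subst h0; rfl
  by_cases hm : k = "-1"
  · subst hm; rfl
  · have e1 : ("1" == k) = false := beq_eq_false_iff_ne.mpr (Ne.symm h1)
    have e0 : ("0" == k) = false := beq_eq_false_iff_ne.mpr (Ne.symm h0)
    have em : ("-1" == k) = false := beq_eq_false_iff_ne.mpr (Ne.symm hm)
    have hc : (PySem.Dict.mk [("1", a), ("0", b), ("-1", c)]).contains k = false := by
      simp only [PySem.Dict.contains_mk, List.any_cons, List.any_nil, e1, e0, em, Bool.or_self]
    rw [hc, if_neg (by simp), if_neg h1, if_neg h0, if_neg hm]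

-- B's fold from a literal three-key dict keeps the three keys and accumulates per key.
lemma alt_loop (xs : List (String × String)) (a b c : String) :
    xs.foldl
      (fun merged_document l =>
        if merged_document.contains l.1 then
          merged_document.modify l.1 "" (· ++ l.2)
        else merged_document)
      (PySem.Dict.mk [("1", a), ("0", b), ("-1", c)])
    = PySem.Dict.mk
        [("1", xs.foldl (fun s l => if l.1 = "1" then s ++ l.2 else s) a),
         ("0", xs.foldl (fun s l => if l.1 = "0" then s ++ l.2 else s) b),
         ("-1", xs.foldl (fun s l => if l.1 = "-1" then s ++ l.2 else s) c)] := by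
  induction xs generalizing a b c with
  | nil => rfl
  | cons hd tl ih =>
    simp only [List.foldl_cons]
    rw [step_eval a b c hd.1 hd.2, ih]

-- ===== VERDICT (by name: the statement is the Claim_ definition above) =====
theorem mergedDocument_spec : Claim_equal_mergedDocument := by
  intro xs _
  show mergedDocument xs = mergedDocument_alt xs
  unfold mergedDocument mergedDocument_alt
  rw [show PySem.Dict.ofList [("1", ""), ("0", ""), ("-1", "")]
      = PySem.Dict.mk [("1", ""), ("0", ""), ("-1", "")] from rfl]
  rw [alt_loop]
  rfl
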